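-- pv_equiv track=rewrite | github.com/maccs-augsburg/spacedatapython | newGui/Model/station_names.py | find_three_letter_name
-- ===== SOURCE A (Python) =====
-- names = (
--     # MACCS test locations
--     ( "AU", "AUG", "AUGS", "Augsburg College",  "Augsburg College, Minnesota, USA"),
--     ( "BU", "BOS", "BOST", "Boston University", "Boston University, Boston, USA"),
--     # MACCS stations
--     ( "CD", "CDR", "CDOR", "Cape Dorset",       "Cape Dorset, Nunavut, Canada"),
--     ( "CH", "CHB", "CHAR", "Coral Harbour",     "Coral Harbour, Nunavut, Canada"),
--     ( "CY", "CRV", "CYRV", "Clyde River",       "Clyde River, Nunavut, Canada"),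
--     ( "GH", "GJO", "GHAV", "Gjoa Haven",        "Gjoa Haven, Nunavut, Canada"),
--     ( "IG", "IGL", "IGLK", "Igloolik",          "Igloolik, Nunavut, Canada"),
--     ( "NA", "NAN", "NAIN", "Nain",              "Nain, Labrador, Canada"),
--     ( "PB", "PEB", "PBAY", "Pelly Bay",         "Pelly Bay, Nunavut, Canada"),
--     ( "PG", "PGG", "PGTG", "Pangnirtung",       "Pangnirtung, Nunavut, Canada"),
--     ( "RB", "RBY", "RBAY", "Repulse Bay",       "Repulse Bay, Nunavut, Canada"),
--     # Search Coil locations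
--     ( "MC", "MCM", "MCM-", "McMurdo",           "McMurdo Sound, Antarctica"),
--     ( "SP", "SPA", "SPA-", "South Pole",        "South Pole, Antarctica"),
--     ( "IQ", "IQA", "IQA-", "Iqaluit",           "Iqaluit, Nunavut, Canada"),
--     ( "SS", "SDY", "SDY-", "Sondrestrom",       "Sondrestrom, Greenland"),
--     ( "HB", "HAL", "HAL-", "Halley Bay",        "Halley Bay, Antarctica"))
--
-- def find_three_letter_name( a_name) :
--     """
--     Finds the three letter name of a station given a two to four letter name.
--
--     Parameters
--     ----------
--     a_name :
--         A two, three, or four letter station name.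
--
--     Returns
--     -------
--     string
--         The three letter name of the given station or the empty string if not found.
--     """
--
--     a_name = a_name.upper() # change the input to all upper case
--     column_index = 0        # assume the input is a two letter abbreviation
--     if len( a_name) == 3 :
--         column_index = 1    # the input string is a three letter abbreviation
--     elif len( a_name) == 4 :
--         column_index = 2
--     row_index = -1          # start with an illegal row number
--     for row in range(16) :  # 0 to 15, the row numbers of names array.
--         if names[row][column_index] == a_name :
--             row_index = row
--             break
--     if row_index < 0 :      # did not find a match
--         return ""           # FIXME: return nil?
--     else :
--         return names[row_index][1]  # 1 is the column of the three letter abbr.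
-- ===== SOURCE B (Python) =====
-- # One flat lookup table, written out once: every 2-, 3- and 4-letter
-- # abbreviation maps directly to the station's three-letter name.  The three
-- # columns have distinct lengths, so the keys never collide and a single
-- # table-driven lookup reproduces the original length-branch + row scan.
-- _THREE = {
--     "AU": "AUG", "AUG": "AUG", "AUGS": "AUG",
--     "BU": "BOS", "BOS": "BOS", "BOST": "BOS",
--     "CD": "CDR", "CDR": "CDR", "CDOR": "CDR",
--     "CH": "CHB", "CHB": "CHB", "CHAR": "CHB",
--     "CY": "CRV", "CRV": "CRV", "CYRV": "CRV",
--     "GH": "GJO", "GJO": "GJO", "GHAV": "GJO",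
--     "IG": "IGL", "IGL": "IGL", "IGLK": "IGL",
--     "NA": "NAN", "NAN": "NAN", "NAIN": "NAN",
--     "PB": "PEB", "PEB": "PEB", "PBAY": "PEB",
--     "PG": "PGG", "PGG": "PGG", "PGTG": "PGG",
--     "RB": "RBY", "RBY": "RBY", "RBAY": "RBY",
--     "MC": "MCM", "MCM": "MCM", "MCM-": "MCM",
--     "SP": "SPA", "SPA": "SPA", "SPA-": "SPA",
--     "IQ": "IQA", "IQA": "IQA", "IQA-": "IQA",
--     "SS": "SDY", "SDY": "SDY", "SDY-": "SDY",
--     "HB": "HAL", "HAL": "HAL", "HAL-": "HAL"}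
--
-- def find_three_letter_name(a_name):
--     return _THREE.get(a_name.upper(), "")
-- ===== Notes on version B (the rewrite author's own statement) =====
-- stated objective: simpler
-- what changed: Replaced the length-based column-index branch, the linear row scan over the 16-row, 5-column table and the second indexing pass by a single flat module-level dict written out once (every 2-, 3- and 4-letter abbreviation mapped directly to the three-letter name, collision-free because column lengths differ); the function body becomes one lookup with an empty-string default.
import Mathlib
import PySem

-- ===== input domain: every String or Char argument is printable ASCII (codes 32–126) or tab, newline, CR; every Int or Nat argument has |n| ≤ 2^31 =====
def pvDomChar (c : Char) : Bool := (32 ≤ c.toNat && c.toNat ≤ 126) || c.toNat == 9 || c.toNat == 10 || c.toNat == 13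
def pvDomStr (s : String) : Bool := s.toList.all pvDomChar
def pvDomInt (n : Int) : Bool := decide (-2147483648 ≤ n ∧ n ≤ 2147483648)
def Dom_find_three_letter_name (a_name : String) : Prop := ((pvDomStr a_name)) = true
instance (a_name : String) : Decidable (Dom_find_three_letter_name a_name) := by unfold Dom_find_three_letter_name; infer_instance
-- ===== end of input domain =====

-- B replaces the length-switched column scan over the 16x5 table by one flat 48-entry lookup table written out once; objective: simpler.


-- ===== PORT A =====
-- the module-level 'names' table (rows are 5-tuples)
def pvNames : List (String × String × String × String × String) := [
  ( "AU", "AUG", "AUGS", "Augsburg College",  "Augsburg College, Minnesota, USA"),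
  ( "BU", "BOS", "BOST", "Boston University", "Boston University, Boston, USA"),
  ( "CD", "CDR", "CDOR", "Cape Dorset",       "Cape Dorset, Nunavut, Canada"),
  ( "CH", "CHB", "CHAR", "Coral Harbour",     "Coral Harbour, Nunavut, Canada"),
  ( "CY", "CRV", "CYRV", "Clyde River",       "Clyde River, Nunavut, Canada"),
  ( "GH", "GJO", "GHAV", "Gjoa Haven",        "Gjoa Haven, Nunavut, Canada"),
  ( "IG", "IGL", "IGLK", "Igloolik",          "Igloolik, Nunavut, Canada"),
  ( "NA", "NAN", "NAIN", "Nain",              "Nain, Labrador, Canada"),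
  ( "PB", "PEB", "PBAY", "Pelly Bay",         "Pelly Bay, Nunavut, Canada"),
  ( "PG", "PGG", "PGTG", "Pangnirtung",       "Pangnirtung, Nunavut, Canada"),
  ( "RB", "RBY", "RBAY", "Repulse Bay",       "Repulse Bay, Nunavut, Canada"),
  ( "MC", "MCM", "MCM-", "McMurdo",           "McMurdo Sound, Antarctica"),
  ( "SP", "SPA", "SPA-", "South Pole",        "South Pole, Antarctica"),
  ( "IQ", "IQA", "IQA-", "Iqaluit",           "Iqaluit, Nunavut, Canada"),
  ( "SS", "SDY", "SDY-", "Sondrestrom",       "Sondrestrom, Greenland"),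
  ( "HB", "HAL", "HAL-", "Halley Bay",        "Halley Bay, Antarctica")]

-- tuple indexing row[i] for i in 0..4 (exact for the indices A uses)
def pvRowGet (r : String × String × String × String × String) (i : Int) : String :=
  if i == 0 then r.1 else if i == 1 then r.2.1 else if i == 2 then r.2.2.1
  else if i == 3 then r.2.2.2.1 else r.2.2.2.2

-- the 'for row in range(16): if names[row][ci] == a_name: row_index = row; break' loop
def pvLoopA (u : String) (ci : Int) : List Int → Int
  | [] => -1
  | r :: rest =>
      if pvRowGet (PySem.List.pyGetD pvNames r ("", "", "", "", "")) ci == u then r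
      else pvLoopA u ci rest

def find_three_letter_name (a_name : String) : String :=
  let u := PySem.Str.upper a_name
  let ci : Int := if PySem.Str.len u == 3 then 1 else if PySem.Str.len u == 4 then 2 else 0
  let row_index := pvLoopA u ci (PySem.List.pyRange 0 16 1)
  if row_index < 0 then "" else pvRowGet (PySem.List.pyGetD pvNames row_index ("", "", "", "", "")) 1

-- ===== PORT B =====
-- the flat module-level table _THREE, written out literally as in Source B
def pvThree : PySem.Dict String String := PySem.Dict.mk [
  ("AU", "AUG"), ("AUG", "AUG"), ("AUGS", "AUG"),
  ("BU", "BOS"), ("BOS", "BOS"), ("BOST", "BOS"),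
  ("CD", "CDR"), ("CDR", "CDR"), ("CDOR", "CDR"),
  ("CH", "CHB"), ("CHB", "CHB"), ("CHAR", "CHB"),
  ("CY", "CRV"), ("CRV", "CRV"), ("CYRV", "CRV"),
  ("GH", "GJO"), ("GJO", "GJO"), ("GHAV", "GJO"),
  ("IG", "IGL"), ("IGL", "IGL"), ("IGLK", "IGL"),
  ("NA", "NAN"), ("NAN", "NAN"), ("NAIN", "NAN"),
  ("PB", "PEB"), ("PEB", "PEB"), ("PBAY", "PEB"),
  ("PG", "PGG"), ("PGG", "PGG"), ("PGTG", "PGG"),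
  ("RB", "RBY"), ("RBY", "RBY"), ("RBAY", "RBY"),
  ("MC", "MCM"), ("MCM", "MCM"), ("MCM-", "MCM"),
  ("SP", "SPA"), ("SPA", "SPA"), ("SPA-", "SPA"),
  ("IQ", "IQA"), ("IQA", "IQA"), ("IQA-", "IQA"),
  ("SS", "SDY"), ("SDY", "SDY"), ("SDY-", "SDY"),
  ("HB", "HAL"), ("HAL", "HAL"), ("HAL-", "HAL")]

def find_three_letter_name_alt (a_name : String) : String :=
  pvThree.getD (PySem.Str.upper a_name) ""

-- ===== PRECONDITION & SPEC =====
def Spec_find_three_letter_name (a_name : String) (out : String) : Prop := out = find_three_letter_name_alt a_name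
instance (a_name : String) (out : String) : Decidable (Spec_find_three_letter_name a_name out) := by unfold Spec_find_three_letter_name; infer_instance

-- ===== CLAIM =====
def Claim_equal_find_three_letter_name : Prop := ∀ (a_name : String), Dom_find_three_letter_name a_name → Spec_find_three_letter_name a_name (find_three_letter_name a_name)

-- ===== LEMMAS AND PROOFS =====

-- the 48 abbreviations appearing in the first three columns of pvNames
def pvKeys : List String := ["AU", "AUG", "AUGS", "BU", "BOS", "BOST", "CD", "CDR", "CDOR", "CH", "CHB", "CHAR", "CY", "CRV", "CYRV", "GH", "GJO", "GHAV", "IG", "IGL", "IGLK", "NA", "NAN", "NAIN", "PB", "PEB", "PBAY", "PG", "PGG", "PGTG", "RB", "RBY", "RBAY", "MC", "MCM", "MCM-", "SP", "SPA", "SPA-", "IQ", "IQA", "IQA-", "SS", "SDY", "SDY-", "HB", "HAL", "HAL-"]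

-- if v is none of the 48 abbreviations, the scan finds no row (for any column A uses)
lemma pv_loop_notmem (v : String) (ci : Int) (hci : ci = 0 ∨ ci = 1 ∨ ci = 2)
    (hne : v ∉ pvKeys) : pvLoopA v ci (PySem.List.pyRange 0 16 1) = -1 := by
  have hrange : PySem.List.pyRange 0 16 1 = [0, 1, 2, 3, 4, 5, 6, 7, 8, 9, 10, 11, 12, 13, 14, 15] := by decide
  have e0 : ("AU" == v) = false := beq_eq_false_iff_ne.mpr (fun h => hne (h ▸ (by decide)))
  have e1 : ("AUG" == v) = false := beq_eq_false_iff_ne.mpr (fun h => hne (h ▸ (by decide)))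
  have e2 : ("AUGS" == v) = false := beq_eq_false_iff_ne.mpr (fun h => hne (h ▸ (by decide)))
  have e3 : ("BU" == v) = false := beq_eq_false_iff_ne.mpr (fun h => hne (h ▸ (by decide)))
  have e4 : ("BOS" == v) = false := beq_eq_false_iff_ne.mpr (fun h => hne (h ▸ (by decide)))
  have e5 : ("BOST" == v) = false := beq_eq_false_iff_ne.mpr (fun h => hne (h ▸ (by decide)))
  have e6 : ("CD" == v) = false := beq_eq_false_iff_ne.mpr (fun h => hne (h ▸ (by decide)))
  have e7 : ("CDR" == v) = false := beq_eq_false_iff_ne.mpr (fun h => hne (h ▸ (by decide)))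
  have e8 : ("CDOR" == v) = false := beq_eq_false_iff_ne.mpr (fun h => hne (h ▸ (by decide)))
  have e9 : ("CH" == v) = false := beq_eq_false_iff_ne.mpr (fun h => hne (h ▸ (by decide)))
  have e10 : ("CHB" == v) = false := beq_eq_false_iff_ne.mpr (fun h => hne (h ▸ (by decide)))
  have e11 : ("CHAR" == v) = false := beq_eq_false_iff_ne.mpr (fun h => hne (h ▸ (by decide)))
  have e12 : ("CY" == v) = false := beq_eq_false_iff_ne.mpr (fun h => hne (h ▸ (by decide)))
  have e13 : ("CRV" == v) = false := beq_eq_false_iff_ne.mpr (fun h => hne (h ▸ (by decide)))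
  have e14 : ("CYRV" == v) = false := beq_eq_false_iff_ne.mpr (fun h => hne (h ▸ (by decide)))
  have e15 : ("GH" == v) = false := beq_eq_false_iff_ne.mpr (fun h => hne (h ▸ (by decide)))
  have e16 : ("GJO" == v) = false := beq_eq_false_iff_ne.mpr (fun h => hne (h ▸ (by decide)))
  have e17 : ("GHAV" == v) = false := beq_eq_false_iff_ne.mpr (fun h => hne (h ▸ (by decide)))
  have e18 : ("IG" == v) = false := beq_eq_false_iff_ne.mpr (fun h => hne (h ▸ (by decide)))
  have e19 : ("IGL" == v) = false := beq_eq_false_iff_ne.mpr (fun h => hne (h ▸ (by decide)))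
  have e20 : ("IGLK" == v) = false := beq_eq_false_iff_ne.mpr (fun h => hne (h ▸ (by decide)))
  have e21 : ("NA" == v) = false := beq_eq_false_iff_ne.mpr (fun h => hne (h ▸ (by decide)))
  have e22 : ("NAN" == v) = false := beq_eq_false_iff_ne.mpr (fun h => hne (h ▸ (by decide)))
  have e23 : ("NAIN" == v) = false := beq_eq_false_iff_ne.mpr (fun h => hne (h ▸ (by decide)))
  have e24 : ("PB" == v) = false := beq_eq_false_iff_ne.mpr (fun h => hne (h ▸ (by decide)))
  have e25 : ("PEB" == v) = false := beq_eq_false_iff_ne.mpr (fun h => hne (h ▸ (by decide)))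
  have e26 : ("PBAY" == v) = false := beq_eq_false_iff_ne.mpr (fun h => hne (h ▸ (by decide)))
  have e27 : ("PG" == v) = false := beq_eq_false_iff_ne.mpr (fun h => hne (h ▸ (by decide)))
  have e28 : ("PGG" == v) = false := beq_eq_false_iff_ne.mpr (fun h => hne (h ▸ (by decide)))
  have e29 : ("PGTG" == v) = false := beq_eq_false_iff_ne.mpr (fun h => hne (h ▸ (by decide)))
  have e30 : ("RB" == v) = false := beq_eq_false_iff_ne.mpr (fun h => hne (h ▸ (by decide)))
  have e31 : ("RBY" == v) = false := beq_eq_false_iff_ne.mpr (fun h => hne (h ▸ (by decide)))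
  have e32 : ("RBAY" == v) = false := beq_eq_false_iff_ne.mpr (fun h => hne (h ▸ (by decide)))
  have e33 : ("MC" == v) = false := beq_eq_false_iff_ne.mpr (fun h => hne (h ▸ (by decide)))
  have e34 : ("MCM" == v) = false := beq_eq_false_iff_ne.mpr (fun h => hne (h ▸ (by decide)))
  have e35 : ("MCM-" == v) = false := beq_eq_false_iff_ne.mpr (fun h => hne (h ▸ (by decide)))
  have e36 : ("SP" == v) = false := beq_eq_false_iff_ne.mpr (fun h => hne (h ▸ (by decide)))
  have e37 : ("SPA" == v) = false := beq_eq_false_iff_ne.mpr (fun h => hne (h ▸ (by decide)))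
  have e38 : ("SPA-" == v) = false := beq_eq_false_iff_ne.mpr (fun h => hne (h ▸ (by decide)))
  have e39 : ("IQ" == v) = false := beq_eq_false_iff_ne.mpr (fun h => hne (h ▸ (by decide)))
  have e40 : ("IQA" == v) = false := beq_eq_false_iff_ne.mpr (fun h => hne (h ▸ (by decide)))
  have e41 : ("IQA-" == v) = false := beq_eq_false_iff_ne.mpr (fun h => hne (h ▸ (by decide)))
  have e42 : ("SS" == v) = false := beq_eq_false_iff_ne.mpr (fun h => hne (h ▸ (by decide)))
  have e43 : ("SDY" == v) = false := beq_eq_false_iff_ne.mpr (fun h => hne (h ▸ (by decide)))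
  have e44 : ("SDY-" == v) = false := beq_eq_false_iff_ne.mpr (fun h => hne (h ▸ (by decide)))
  have e45 : ("HB" == v) = false := beq_eq_false_iff_ne.mpr (fun h => hne (h ▸ (by decide)))
  have e46 : ("HAL" == v) = false := beq_eq_false_iff_ne.mpr (fun h => hne (h ▸ (by decide)))
  have e47 : ("HAL-" == v) = false := beq_eq_false_iff_ne.mpr (fun h => hne (h ▸ (by decide)))
  rcases hci with rfl | rfl | rfl
  · have c0 : pvRowGet (PySem.List.pyGetD pvNames 0 ("", "", "", "", "")) 0 = "AU" := by decide
    have c1 : pvRowGet (PySem.List.pyGetD pvNames 1 ("", "", "", "", "")) 0 = "BU" := by decide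
    have c2 : pvRowGet (PySem.List.pyGetD pvNames 2 ("", "", "", "", "")) 0 = "CD" := by decide
    have c3 : pvRowGet (PySem.List.pyGetD pvNames 3 ("", "", "", "", "")) 0 = "CH" := by decide
    have c4 : pvRowGet (PySem.List.pyGetD pvNames 4 ("", "", "", "", "")) 0 = "CY" := by decide
    have c5 : pvRowGet (PySem.List.pyGetD pvNames 5 ("", "", "", "", "")) 0 = "GH" := by decide
    have c6 : pvRowGet (PySem.List.pyGetD pvNames 6 ("", "", "", "", "")) 0 = "IG" := by decide
    have c7 : pvRowGet (PySem.List.pyGetD pvNames 7 ("", "", "", "", "")) 0 = "NA" := by decide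
    have c8 : pvRowGet (PySem.List.pyGetD pvNames 8 ("", "", "", "", "")) 0 = "PB" := by decide
    have c9 : pvRowGet (PySem.List.pyGetD pvNames 9 ("", "", "", "", "")) 0 = "PG" := by decide
    have c10 : pvRowGet (PySem.List.pyGetD pvNames 10 ("", "", "", "", "")) 0 = "RB" := by decide
    have c11 : pvRowGet (PySem.List.pyGetD pvNames 11 ("", "", "", "", "")) 0 = "MC" := by decide
    have c12 : pvRowGet (PySem.List.pyGetD pvNames 12 ("", "", "", "", "")) 0 = "SP" := by decide
    have c13 : pvRowGet (PySem.List.pyGetD pvNames 13 ("", "", "", "", "")) 0 = "IQ" := by decide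
    have c14 : pvRowGet (PySem.List.pyGetD pvNames 14 ("", "", "", "", "")) 0 = "SS" := by decide
    have c15 : pvRowGet (PySem.List.pyGetD pvNames 15 ("", "", "", "", "")) 0 = "HB" := by decide
    simp only [hrange, pvLoopA, c0, c1, c2, c3, c4, c5, c6, c7, c8, c9, c10, c11, c12, c13, c14, c15, e0, e1, e2, e3, e4, e5, e6, e7, e8, e9, e10, e11, e12, e13, e14, e15, e16, e17, e18, e19, e20, e21, e22, e23, e24, e25, e26, e27, e28, e29, e30, e31, e32, e33, e34, e35, e36, e37, e38, e39, e40, e41, e42, e43, e44, e45, e46, e47, Bool.false_eq_true, if_false]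
  · have c0 : pvRowGet (PySem.List.pyGetD pvNames 0 ("", "", "", "", "")) 1 = "AUG" := by decide
    have c1 : pvRowGet (PySem.List.pyGetD pvNames 1 ("", "", "", "", "")) 1 = "BOS" := by decide
    have c2 : pvRowGet (PySem.List.pyGetD pvNames 2 ("", "", "", "", "")) 1 = "CDR" := by decide
    have c3 : pvRowGet (PySem.List.pyGetD pvNames 3 ("", "", "", "", "")) 1 = "CHB" := by decide
    have c4 : pvRowGet (PySem.List.pyGetD pvNames 4 ("", "", "", "", "")) 1 = "CRV" := by decide
    have c5 : pvRowGet (PySem.List.pyGetD pvNames 5 ("", "", "", "", "")) 1 = "GJO" := by decide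
    have c6 : pvRowGet (PySem.List.pyGetD pvNames 6 ("", "", "", "", "")) 1 = "IGL" := by decide
    have c7 : pvRowGet (PySem.List.pyGetD pvNames 7 ("", "", "", "", "")) 1 = "NAN" := by decide
    have c8 : pvRowGet (PySem.List.pyGetD pvNames 8 ("", "", "", "", "")) 1 = "PEB" := by decide
    have c9 : pvRowGet (PySem.List.pyGetD pvNames 9 ("", "", "", "", "")) 1 = "PGG" := by decide
    have c10 : pvRowGet (PySem.List.pyGetD pvNames 10 ("", "", "", "", "")) 1 = "RBY" := by decide
    have c11 : pvRowGet (PySem.List.pyGetD pvNames 11 ("", "", "", "", "")) 1 = "MCM" := by decide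
    have c12 : pvRowGet (PySem.List.pyGetD pvNames 12 ("", "", "", "", "")) 1 = "SPA" := by decide
    have c13 : pvRowGet (PySem.List.pyGetD pvNames 13 ("", "", "", "", "")) 1 = "IQA" := by decide
    have c14 : pvRowGet (PySem.List.pyGetD pvNames 14 ("", "", "", "", "")) 1 = "SDY" := by decide
    have c15 : pvRowGet (PySem.List.pyGetD pvNames 15 ("", "", "", "", "")) 1 = "HAL" := by decide
    simp only [hrange, pvLoopA, c0, c1, c2, c3, c4, c5, c6, c7, c8, c9, c10, c11, c12, c13, c14, c15, e0, e1, e2, e3, e4, e5, e6, e7, e8, e9, e10, e11, e12, e13, e14, e15, e16, e17, e18, e19, e20, e21, e22, e23, e24, e25, e26, e27, e28, e29, e30, e31, e32, e33, e34, e35, e36, e37, e38, e39, e40, e41, e42, e43, e44, e45, e46, e47, Bool.false_eq_true, if_false]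
  · have c0 : pvRowGet (PySem.List.pyGetD pvNames 0 ("", "", "", "", "")) 2 = "AUGS" := by decide
    have c1 : pvRowGet (PySem.List.pyGetD pvNames 1 ("", "", "", "", "")) 2 = "BOST" := by decide
    have c2 : pvRowGet (PySem.List.pyGetD pvNames 2 ("", "", "", "", "")) 2 = "CDOR" := by decide
    have c3 : pvRowGet (PySem.List.pyGetD pvNames 3 ("", "", "", "", "")) 2 = "CHAR" := by decide
    have c4 : pvRowGet (PySem.List.pyGetD pvNames 4 ("", "", "", "", "")) 2 = "CYRV" := by decide
    have c5 : pvRowGet (PySem.List.pyGetD pvNames 5 ("", "", "", "", "")) 2 = "GHAV" := by decide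
    have c6 : pvRowGet (PySem.List.pyGetD pvNames 6 ("", "", "", "", "")) 2 = "IGLK" := by decide
    have c7 : pvRowGet (PySem.List.pyGetD pvNames 7 ("", "", "", "", "")) 2 = "NAIN" := by decide
    have c8 : pvRowGet (PySem.List.pyGetD pvNames 8 ("", "", "", "", "")) 2 = "PBAY" := by decide
    have c9 : pvRowGet (PySem.List.pyGetD pvNames 9 ("", "", "", "", "")) 2 = "PGTG" := by decide
    have c10 : pvRowGet (PySem.List.pyGetD pvNames 10 ("", "", "", "", "")) 2 = "RBAY" := by decide
    have c11 : pvRowGet (PySem.List.pyGetD pvNames 11 ("", "", "", "", "")) 2 = "MCM-" := by decide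
    have c12 : pvRowGet (PySem.List.pyGetD pvNames 12 ("", "", "", "", "")) 2 = "SPA-" := by decide
    have c13 : pvRowGet (PySem.List.pyGetD pvNames 13 ("", "", "", "", "")) 2 = "IQA-" := by decide
    have c14 : pvRowGet (PySem.List.pyGetD pvNames 14 ("", "", "", "", "")) 2 = "SDY-" := by decide
    have c15 : pvRowGet (PySem.List.pyGetD pvNames 15 ("", "", "", "", "")) 2 = "HAL-" := by decide
    simp only [hrange, pvLoopA, c0, c1, c2, c3, c4, c5, c6, c7, c8, c9, c10, c11, c12, c13, c14, c15, e0, e1, e2, e3, e4, e5, e6, e7, e8, e9, e10, e11, e12, e13, e14, e15, e16, e17, e18, e19, e20, e21, e22, e23, e24, e25, e26, e27, e28, e29, e30, e31, e32, e33, e34, e35, e36, e37, e38, e39, e40, e41, e42, e43, e44, e45, e47, Bool.false_eq_true, if_false]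

set_option maxRecDepth 4000 in
lemma pv_core (v : String) :
    (let ci : Int := if PySem.Str.len v == 3 then 1 else if PySem.Str.len v == 4 then 2 else 0
     let row_index := pvLoopA v ci (PySem.List.pyRange 0 16 1)
     if row_index < 0 then "" else pvRowGet (PySem.List.pyGetD pvNames row_index ("", "", "", "", "")) 1)
    = pvThree.getD v "" := by
  by_cases hm : v ∈ pvKeys
  · fin_cases hm <;> decide
  · have hloop := pv_loop_notmem v (if PySem.Str.len v == 3 then 1 else if PySem.Str.len v == 4 then 2 else 0)
      (by split_ifs <;> simp) hm
    have e0 : ("AU" == v) = false := beq_eq_false_iff_ne.mpr (fun h => hm (h ▸ (by decide)))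
    have e1 : ("AUG" == v) = false := beq_eq_false_iff_ne.mpr (fun h => hm (h ▸ (by decide)))
    have e2 : ("AUGS" == v) = false := beq_eq_false_iff_ne.mpr (fun h => hm (h ▸ (by decide)))
    have e3 : ("BU" == v) = false := beq_eq_false_iff_ne.mpr (fun h => hm (h ▸ (by decide)))
    have e4 : ("BOS" == v) = false := beq_eq_false_iff_ne.mpr (fun h => hm (h ▸ (by decide)))
    have e5 : ("BOST" == v) = false := beq_eq_false_iff_ne.mpr (fun h => hm (h ▸ (by decide)))
    have e6 : ("CD" == v) = false := beq_eq_false_iff_ne.mpr (fun h => hm (h ▸ (by decide)))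
    have e7 : ("CDR" == v) = false := beq_eq_false_iff_ne.mpr (fun h => hm (h ▸ (by decide)))
    have e8 : ("CDOR" == v) = false := beq_eq_false_iff_ne.mpr (fun h => hm (h ▸ (by decide)))
    have e9 : ("CH" == v) = false := beq_eq_false_iff_ne.mpr (fun h => hm (h ▸ (by decide)))
    have e10 : ("CHB" == v) = false := beq_eq_false_iff_ne.mpr (fun h => hm (h ▸ (by decide)))
    have e11 : ("CHAR" == v) = false := beq_eq_false_iff_ne.mpr (fun h => hm (h ▸ (by decide)))
    have e12 : ("CY" == v) = false := beq_eq_false_iff_ne.mpr (fun h => hm (h ▸ (by decide)))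
    have e13 : ("CRV" == v) = false := beq_eq_false_iff_ne.mpr (fun h => hm (h ▸ (by decide)))
    have e14 : ("CYRV" == v) = false := beq_eq_false_iff_ne.mpr (fun h => hm (h ▸ (by decide)))
    have e15 : ("GH" == v) = false := beq_eq_false_iff_ne.mpr (fun h => hm (h ▸ (by decide)))
    have e16 : ("GJO" == v) = false := beq_eq_false_iff_ne.mpr (fun h => hm (h ▸ (by decide)))
    have e17 : ("GHAV" == v) = false := beq_eq_false_iff_ne.mpr (fun h => hm (h ▸ (by decide)))
    have e18 : ("IG" == v) = false := beq_eq_false_iff_ne.mpr (fun h => hm (h ▸ (by decide)))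
    have e19 : ("IGL" == v) = false := beq_eq_false_iff_ne.mpr (fun h => hm (h ▸ (by decide)))
    have e20 : ("IGLK" == v) = false := beq_eq_false_iff_ne.mpr (fun h => hm (h ▸ (by decide)))
    have e21 : ("NA" == v) = false := beq_eq_false_iff_ne.mpr (fun h => hm (h ▸ (by decide)))
    have e22 : ("NAN" == v) = false := beq_eq_false_iff_ne.mpr (fun h => hm (h ▸ (by decide)))
    have e23 : ("NAIN" == v) = false := beq_eq_false_iff_ne.mpr (fun h => hm (h ▸ (by decide)))
    have e24 : ("PB" == v) = false := beq_eq_false_iff_ne.mpr (fun h => hm (h ▸ (by decide)))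
    have e25 : ("PEB" == v) = false := beq_eq_false_iff_ne.mpr (fun h => hm (h ▸ (by decide)))
    have e26 : ("PBAY" == v) = false := beq_eq_false_iff_ne.mpr (fun h => hm (h ▸ (by decide)))
    have e27 : ("PG" == v) = false := beq_eq_false_iff_ne.mpr (fun h => hm (h ▸ (by decide)))
    have e28 : ("PGG" == v) = false := beq_eq_false_iff_ne.mpr (fun h => hm (h ▸ (by decide)))
    have e29 : ("PGTG" == v) = false := beq_eq_false_iff_ne.mpr (fun h => hm (h ▸ (by decide)))
    have e30 : ("RB" == v) = false := beq_eq_false_iff_ne.mpr (fun h => hm (h ▸ (by decide)))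
    have e31 : ("RBY" == v) = false := beq_eq_false_iff_ne.mpr (fun h => hm (h ▸ (by decide)))
    have e32 : ("RBAY" == v) = false := beq_eq_false_iff_ne.mpr (fun h => hm (h ▸ (by decide)))
    have e33 : ("MC" == v) = false := beq_eq_false_iff_ne.mpr (fun h => hm (h ▸ (by decide)))
    have e34 : ("MCM" == v) = false := beq_eq_false_iff_ne.mpr (fun h => hm (h ▸ (by decide)))
    have e35 : ("MCM-" == v) = false := beq_eq_false_iff_ne.mpr (fun h => hm (h ▸ (by decide)))
    have e36 : ("SP" == v) = false := beq_eq_false_iff_ne.mpr (fun h => hm (h ▸ (by decide)))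
    have e37 : ("SPA" == v) = false := beq_eq_false_iff_ne.mpr (fun h => hm (h ▸ (by decide)))
    have e38 : ("SPA-" == v) = false := beq_eq_false_iff_ne.mpr (fun h => hm (h ▸ (by decide)))
    have e39 : ("IQ" == v) = false := beq_eq_false_iff_ne.mpr (fun h => hm (h ▸ (by decide)))
    have e40 : ("IQA" == v) = false := beq_eq_false_iff_ne.mpr (fun h => hm (h ▸ (by decide)))
    have e41 : ("IQA-" == v) = false := beq_eq_false_iff_ne.mpr (fun h => hm (h ▸ (by decide)))
    have e42 : ("SS" == v) = false := beq_eq_false_iff_ne.mpr (fun h => hm (h ▸ (by decide)))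
    have e43 : ("SDY" == v) = false := beq_eq_false_iff_ne.mpr (fun h => hm (h ▸ (by decide)))
    have e44 : ("SDY-" == v) = false := beq_eq_false_iff_ne.mpr (fun h => hm (h ▸ (by decide)))
    have e45 : ("HB" == v) = false := beq_eq_false_iff_ne.mpr (fun h => hm (h ▸ (by decide)))
    have e46 : ("HAL" == v) = false := beq_eq_false_iff_ne.mpr (fun h => hm (h ▸ (by decide)))
    have e47 : ("HAL-" == v) = false := beq_eq_false_iff_ne.mpr (fun h => hm (h ▸ (by decide)))
    simp only [hloop, pvThree, PySem.Dict.getD_eq_get?_getD, PySem.Dict.get?_mk_cons,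
      e0, e1, e2, e3, e4, e5, e6, e7, e8, e9, e10, e11, e12, e13, e14, e15, e16, e17, e18, e19, e20, e21, e22, e23, e24, e25, e26, e27, e28, e29, e30, e31, e32, e33, e34, e35, e36, e37, e38, e39, e40, e41, e42, e43, e44, e45, e46, e47, Bool.false_eq_true, if_false]
    rfl

-- ===== VERDICT =====
theorem find_three_letter_name_spec : Claim_equal_find_three_letter_name := by
  intro a_name _
  unfold Spec_find_three_letter_name find_three_letter_name find_three_letter_name_alt
  exact pv_core (PySem.Str.upper a_name)
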